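-- pv_equiv track=rewrite | github.com/sam3201/NN_C | comprehensive_math_training.py | parse_problems
-- ===== SOURCE A (Python) =====
-- def parse_problems(content, category):
--     """Parse problems from text content"""
--     problems = []
--     lines = content.split('\n')
--     current_problem = {}
--
--     for line in lines:
--         line = line.strip()
--         if line.startswith("Problem:"):
--             if current_problem:
--                 problems.append(current_problem)
--             current_problem = {
--                 'category': category,
--                 'problem': line.replace("Problem:", "").strip(),
--                 'solution': '',
--                 'explanation': ''
--             }
--         elif line.startswith("Solution:") and current_problem:
--             current_problem['solution'] = line.replace("Solution:", "").strip()
--         elif line.startswith("Explanation:") and current_problem: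
--             current_problem['explanation'] = line.replace("Explanation:", "").strip()
--
--     if current_problem:
--         problems.append(current_problem)
--
--     return problems
-- ===== SOURCE B (Python) =====
-- def parse_problems(content, category):
--     """Parse problems from text content (boundary-split re-implementation)."""
--     lines = [ln.strip() for ln in content.split('\n')]
--     # drop everything before the first 'Problem:' header
--     while lines and not lines[0].startswith("Problem:"):
--         lines.pop(0)
--     return _parse_blocks(lines, category)
--
--
-- def _parse_blocks(lines, category):
--     # 'lines' is empty or starts with a 'Problem:' header line
--     if not lines:
--         return []
--     header, rest = lines[0], lines[1:]
--     body = []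
--     while rest and not rest[0].startswith("Problem:"):
--         body.append(rest.pop(0))
--     prob = {
--         'category': category,
--         'problem': header.replace("Problem:", "").strip(),
--         'solution': '',
--         'explanation': '',
--     }
--     for ln in body:
--         if ln.startswith("Solution:"):
--             prob['solution'] = ln.replace("Solution:", "").strip()
--         elif ln.startswith("Explanation:"):
--             prob['explanation'] = ln.replace("Explanation:", "").strip()
--     return [prob] + _parse_blocks(rest, category)
-- ===== Notes on version B (the rewrite author's own statement) =====
-- stated objective: alternative
-- what changed: Replaces A's single-pass state machine (mutable current_problem dict carried through one loop with append-on-next-header and final flush) by a recursive boundary decomposition: strip all lines up front, drop the prefix before the first 'Problem:' header, then recursively split the remaining lines at 'Problem:' boundaries into per-problem blocks, building each problem dict from its header and a scan of its own body lines.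
import Mathlib
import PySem

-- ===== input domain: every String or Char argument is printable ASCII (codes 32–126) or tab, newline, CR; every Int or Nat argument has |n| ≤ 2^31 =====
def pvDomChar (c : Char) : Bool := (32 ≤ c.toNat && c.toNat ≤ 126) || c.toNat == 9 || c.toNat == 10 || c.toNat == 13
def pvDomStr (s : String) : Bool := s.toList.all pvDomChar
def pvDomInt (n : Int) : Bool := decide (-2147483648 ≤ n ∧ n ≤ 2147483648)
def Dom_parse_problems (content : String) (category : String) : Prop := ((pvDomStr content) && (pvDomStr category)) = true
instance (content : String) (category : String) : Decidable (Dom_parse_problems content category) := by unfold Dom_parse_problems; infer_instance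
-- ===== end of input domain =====

-- B re-parses by a different decomposition (drop the pre-header prefix, then recursively split the
-- lines into per-problem blocks at 'Problem:' boundaries) instead of A's single-pass state machine;
-- objective: alternative structure, same exact return value.

-- ===== PORT A =====
-- One loop iteration of A's for-loop (st = (problems, current_problem)); the strip happens at the call site.
def pvStepA (category : String)
    (st : List (List (String × String)) × PySem.Dict String String)
    (line : String) : List (List (String × String)) × PySem.Dict String String :=
  if PySem.Str.startswith line "Problem:" = true then
    ((if st.2.size ≠ 0 then st.1 ++ [st.2.items] else st.1),
     PySem.Dict.ofList [("category", category),
       ("problem", PySem.Str.strip (PySem.Str.replace line "Problem:" "")),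
       ("solution", ""), ("explanation", "")])
  else if PySem.Str.startswith line "Solution:" = true ∧ st.2.size ≠ 0 then
    (st.1, st.2.insert "solution" (PySem.Str.strip (PySem.Str.replace line "Solution:" "")))
  else if PySem.Str.startswith line "Explanation:" = true ∧ st.2.size ≠ 0 then
    (st.1, st.2.insert "explanation" (PySem.Str.strip (PySem.Str.replace line "Explanation:" "")))
  else st

def parse_problems (content : String) (category : String) : List (List (String × String)) :=
  let lines := (PySem.Str.split? content "\n").getD []
  let st := lines.foldl (fun st rawline => pvStepA category st (PySem.Str.strip rawline))
      ([], PySem.Dict.empty)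
  if st.2.size ≠ 0 then st.1 ++ [st.2.items] else st.1

-- ===== PORT B =====
def pvIsHeader (ln : String) : Bool := PySem.Str.startswith ln "Problem:"

-- the inner 'for ln in body' loop of Source B
def pvBodyStep (prob : PySem.Dict String String) (ln : String) : PySem.Dict String String :=
  if PySem.Str.startswith ln "Solution:" = true then
    prob.insert "solution" (PySem.Str.strip (PySem.Str.replace ln "Solution:" ""))
  else if PySem.Str.startswith ln "Explanation:" = true then
    prob.insert "explanation" (PySem.Str.strip (PySem.Str.replace ln "Explanation:" ""))
  else prob

-- _parse_blocks of Source B: the body-collecting while loop is takeWhile/dropWhile at the first boundary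
def pvParseBlocks : List String → String → List (List (String × String))
  | [], _ => []
  | header :: rest, category =>
    let body := rest.takeWhile (fun ln => !pvIsHeader ln)
    let rest' := rest.dropWhile (fun ln => !pvIsHeader ln)
    let prob := PySem.Dict.ofList [("category", category),
      ("problem", PySem.Str.strip (PySem.Str.replace header "Problem:" "")),
      ("solution", ""), ("explanation", "")]
    (body.foldl pvBodyStep prob).items :: pvParseBlocks rest' category
  termination_by lines _ => lines.length
  decreasing_by simpa using Nat.lt_succ_of_le (List.length_dropWhile_le _ rest)

def parse_problems_alt (content : String) (category : String) : List (List (String × String)) :=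
  let lines := ((PySem.Str.split? content "\n").getD []).map PySem.Str.strip
  pvParseBlocks (lines.dropWhile (fun ln => !pvIsHeader ln)) category

-- ===== PRECONDITION & SPEC =====
def Spec_parse_problems (content : String) (category : String) (out : List (List (String × String))) : Prop := out = parse_problems_alt content category
instance (content : String) (category : String) (out : List (List (String × String))) : Decidable (Spec_parse_problems content category out) := by unfold Spec_parse_problems; infer_instance

-- ===== CLAIM (what is proved, stated in full; the proofs are below) =====
def Claim_equal_parse_problems : Prop := ∀ (content : String) (category : String), Dom_parse_problems content category → Spec_parse_problems content category (parse_problems content category)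

-- ===== LEMMAS AND PROOFS =====

theorem pv_size_ne_zero_of_contains (d : PySem.Dict String String) (k : String)
    (h : d.contains k = true) : d.size ≠ 0 := by
  have hk : k ∈ d.keys := (PySem.Dict.contains_iff_mem_keys d k).mp h
  simp only [PySem.Dict.keys, PySem.Dict.size] at *
  intro h0; rw [List.length_eq_zero_iff] at h0; simp [h0] at hk

theorem pv_size_insert_ne_zero (d : PySem.Dict String String) (k v : String) :
    (d.insert k v).size ≠ 0 := by
  rw [PySem.Dict.size_insert]
  split
  · next h => exact pv_size_ne_zero_of_contains d k h
  · simp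

theorem pv_bodyStep_size (prob : PySem.Dict String String) (ln : String)
    (h : prob.size ≠ 0) : (pvBodyStep prob ln).size ≠ 0 := by
  unfold pvBodyStep
  split
  · exact pv_size_insert_ne_zero _ _ _
  · split
    · exact pv_size_insert_ne_zero _ _ _
    · exact h

theorem pv_bodyFold_size (L : List String) (prob : PySem.Dict String String)
    (h : prob.size ≠ 0) : (L.foldl pvBodyStep prob).size ≠ 0 := by
  induction L generalizing prob with
  | nil => exact h
  | cons l ls ih => exact ih _ (pv_bodyStep_size _ _ h)

theorem pv_mkProb_size (category p : String) :
    (PySem.Dict.ofList [("category", category), ("problem", p),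
      ("solution", ""), ("explanation", "")] : PySem.Dict String String).size ≠ 0 := by
  simp only [PySem.Dict.ofList, PySem.Dict.update, List.foldl_cons, List.foldl_nil]
  exact pv_size_insert_ne_zero _ _ _

-- L1: while current_problem is empty, non-header lines do nothing
theorem pv_skip (category : String) (L : List String) :
    L.foldl (pvStepA category) ([], PySem.Dict.empty)
      = (L.dropWhile (fun ln => !pvIsHeader ln)).foldl (pvStepA category) ([], PySem.Dict.empty) := by
  induction L with
  | nil => rfl
  | cons l ls ih =>
    by_cases h : pvIsHeader l = true
    · simp [h]
    · have h' : pvIsHeader l = false := by simpa using h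
      have h'' : PySem.Str.startswith l "Problem:" = false := h'
      have hstep : pvStepA category ([], PySem.Dict.empty) l = ([], PySem.Dict.empty) := by
        unfold pvStepA
        rw [if_neg (by simpa using h''), if_neg (fun hc => hc.2 PySem.Dict.size_empty),
          if_neg (fun hc => hc.2 PySem.Dict.size_empty)]
      simp only [List.foldl_cons, hstep, List.dropWhile_cons, h', Bool.not_false, if_pos]
      exact ih

-- L2: over a run of non-header lines, A's loop only updates current_problem, exactly as B's body loop
theorem pv_body (category : String) (L : List String)
    (hL : ∀ l ∈ L, pvIsHeader l = false)
    (acc : List (List (String × String))) (cur : PySem.Dict String String)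
    (hcur : cur.size ≠ 0) :
    L.foldl (pvStepA category) (acc, cur) = (acc, L.foldl pvBodyStep cur) := by
  induction L generalizing cur with
  | nil => rfl
  | cons l ls ih =>
    have hl : pvIsHeader l = false := hL l (by simp)
    have hl' : PySem.Str.startswith l "Problem:" = false := hl
    have hstep : pvStepA category (acc, cur) l = (acc, pvBodyStep cur l) := by
      unfold pvStepA pvBodyStep
      rw [if_neg (by simpa using hl')]
      by_cases hs : PySem.Str.startswith l "Solution:" = true
      · rw [if_pos ⟨hs, hcur⟩, if_pos hs]
      · rw [if_neg (fun hc => hs hc.1), if_neg hs]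
        by_cases he : PySem.Str.startswith l "Explanation:" = true
        · rw [if_pos ⟨he, hcur⟩, if_pos he]
        · rw [if_neg (fun hc => he hc.1), if_neg he]
    simp only [List.foldl_cons, hstep]
    exact ih (fun x hx => hL x (by simp [hx])) _ (pv_bodyStep_size _ _ hcur)

-- main invariant: with a nonempty current_problem, the rest of A's loop produces the blocks of B
theorem pv_main (category : String) : ∀ (n : Nat) (L : List String), L.length ≤ n →
    ∀ (acc : List (List (String × String))) (cur : PySem.Dict String String), cur.size ≠ 0 →
    (let st := L.foldl (pvStepA category) (acc, cur)
     if st.2.size ≠ 0 then st.1 ++ [st.2.items] else st.1)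
      = acc ++ ((L.takeWhile (fun ln => !pvIsHeader ln)).foldl pvBodyStep cur).items
          :: pvParseBlocks (L.dropWhile (fun ln => !pvIsHeader ln)) category := by
  intro n
  induction n with
  | zero =>
    intro L hL acc cur hcur
    have : L = [] := List.length_eq_zero_iff.mp (Nat.le_zero.mp hL)
    subst this
    simp [pvParseBlocks, hcur]
  | succ n ih =>
    intro L hL acc cur hcur
    have hsplit : L.takeWhile (fun ln => !pvIsHeader ln) ++ L.dropWhile (fun ln => !pvIsHeader ln) = L :=
      List.takeWhile_append_dropWhile
    have htake : ∀ l ∈ L.takeWhile (fun ln => !pvIsHeader ln), pvIsHeader l = false := by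
      intro l hl
      have := List.mem_takeWhile_imp hl
      simpa using this
    have hfold1 : L.foldl (pvStepA category) (acc, cur)
        = (L.dropWhile (fun ln => !pvIsHeader ln)).foldl (pvStepA category)
            (acc, (L.takeWhile (fun ln => !pvIsHeader ln)).foldl pvBodyStep cur) := by
      conv_lhs => rw [← hsplit]
      rw [List.foldl_append, pv_body category _ htake _ _ hcur]
    set cur' := (L.takeWhile (fun ln => !pvIsHeader ln)).foldl pvBodyStep cur with hcur'
    have hcur'ne : cur'.size ≠ 0 := pv_bodyFold_size _ _ hcur
    cases hdrop : L.dropWhile (fun ln => !pvIsHeader ln) with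
    | nil =>
      simp only [hfold1, hdrop, List.foldl_nil, pvParseBlocks]
      simp [hcur'ne]
    | cons h rest =>
      have hh : pvIsHeader h = true := by
        have hne : L.dropWhile (fun ln => !pvIsHeader ln) ≠ [] := by simp [hdrop]
        have := List.head_dropWhile_not (fun ln => !pvIsHeader ln) hne
        simpa [hdrop] using this
      have hstep : pvStepA category (acc, cur') h
          = (acc ++ [cur'.items],
             PySem.Dict.ofList [("category", category),
               ("problem", PySem.Str.strip (PySem.Str.replace h "Problem:" "")),
               ("solution", ""), ("explanation", "")]) := by
        have hh' : PySem.Str.startswith h "Problem:" = true := hh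
        unfold pvStepA
        rw [if_pos hh', if_pos hcur'ne]
      have hlen : rest.length ≤ n := by
        have h1 : (L.dropWhile (fun ln => !pvIsHeader ln)).length ≤ L.length :=
          List.length_dropWhile_le _ L
        rw [hdrop] at h1
        simp only [List.length_cons] at h1
        omega
      have := ih rest hlen (acc ++ [cur'.items])
        (PySem.Dict.ofList [("category", category),
          ("problem", PySem.Str.strip (PySem.Str.replace h "Problem:" "")),
          ("solution", ""), ("explanation", "")])
        (pv_mkProb_size category _)
      simp only [hfold1, hdrop, List.foldl_cons, hstep]
      rw [this]
      simp [pvParseBlocks]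
  -- proof above also covers: when dropWhile is empty, the final 'if current_problem' append closes the block

-- ===== VERDICT (by name: the statement is the Claim_ definition above) =====
theorem parse_problems_spec : Claim_equal_parse_problems := by
  intro content category _
  unfold Spec_parse_problems parse_problems parse_problems_alt
  simp only []
  have hfm : ∀ (init : List (List (String × String)) × PySem.Dict String String) (ls : List String),
      ls.foldl (fun st raw => pvStepA category st (PySem.Str.strip raw)) init
        = (ls.map PySem.Str.strip).foldl (pvStepA category) init := by
    intro init ls; rw [List.foldl_map]
  rw [hfm]
  set L := ((PySem.Str.split? content "\n").getD []).map PySem.Str.strip with hLdef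
  rw [show (L.foldl (pvStepA category) ([], PySem.Dict.empty))
        = ((L.dropWhile (fun ln => !pvIsHeader ln)).foldl (pvStepA category) ([], PySem.Dict.empty))
      from pv_skip category L]
  cases hdrop : L.dropWhile (fun ln => !pvIsHeader ln) with
  | nil => simp [pvParseBlocks, PySem.Dict.size_empty]
  | cons h rest =>
    have hh : pvIsHeader h = true := by
      have hne : L.dropWhile (fun ln => !pvIsHeader ln) ≠ [] := by simp [hdrop]
      have := List.head_dropWhile_not (fun ln => !pvIsHeader ln) hne
      simpa [hdrop] using this
    have hstep : pvStepA category ([], PySem.Dict.empty) h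
        = ([], PySem.Dict.ofList [("category", category),
            ("problem", PySem.Str.strip (PySem.Str.replace h "Problem:" "")),
            ("solution", ""), ("explanation", "")]) := by
      have hh' : PySem.Str.startswith h "Problem:" = true := hh
      unfold pvStepA
      rw [if_pos hh', if_neg (fun hc => hc PySem.Dict.size_empty)]
    rw [List.foldl_cons, hstep]
    have := pv_main category rest.length rest (le_refl _) []
      (PySem.Dict.ofList [("category", category),
        ("problem", PySem.Str.strip (PySem.Str.replace h "Problem:" "")),
        ("solution", ""), ("explanation", "")])
      (pv_mkProb_size category _)
    rw [this]
    simp [pvParseBlocks]
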